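-- pv_equiv track=rewrite | github.com/virenderox/LeetCode-Problem | Hashmap/Largest Subarray with 0 , 1 and 2/maxlen.py | largestSubarry
-- ===== SOURCE A (Python) =====
-- def largestSubarry(num,N):
--     ans = 0
--
--     memo = {}
--
--     countZeros = countOnes= countTwos = 0
--
--     key = str(countOnes - countZeros) + '#' + str(countTwos - countOnes)
--
--     memo[key] = -1
--
--
--     for i in range(N):
--
--         if num[i] == 0:
--             countZeros += 1
--
--         elif num[i] == 1:
--             countOnes += 1
--
--         else:
--             countTwos += 1
--
--         currentKey = str(countOnes - countZeros) + '#' + str(countTwos - countOnes)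
--
--         if currentKey in memo:
--             prev = memo[currentKey]
--             leng = i - prev
--             ans = max(ans,leng)
--         else:
--             memo[currentKey] = i
--
--
--     return ans
-- ===== SOURCE B (Python) =====
-- def largestSubarry(num, N):
--     # brute force over all windows: running counts of 0s, 1s and others per start
--     ans = 0
--     for p in range(N):
--         z = o = t = 0
--         for q in range(p, N):
--             x = num[q]
--             if x == 0:
--                 z += 1
--             elif x == 1:
--                 o += 1
--             else:
--                 t += 1
--             if z == o == t:
--                 ans = max(ans, q - p + 1)
--     return ans
-- ===== Notes on version B (the rewrite author's own statement) =====
-- stated objective: alternative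
-- what changed: Replaces the hash-map of first-seen prefix-difference keys by a direct brute-force scan over all windows with running 0/1/other counts, updating the max where the three counts are equal.
import Mathlib
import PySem

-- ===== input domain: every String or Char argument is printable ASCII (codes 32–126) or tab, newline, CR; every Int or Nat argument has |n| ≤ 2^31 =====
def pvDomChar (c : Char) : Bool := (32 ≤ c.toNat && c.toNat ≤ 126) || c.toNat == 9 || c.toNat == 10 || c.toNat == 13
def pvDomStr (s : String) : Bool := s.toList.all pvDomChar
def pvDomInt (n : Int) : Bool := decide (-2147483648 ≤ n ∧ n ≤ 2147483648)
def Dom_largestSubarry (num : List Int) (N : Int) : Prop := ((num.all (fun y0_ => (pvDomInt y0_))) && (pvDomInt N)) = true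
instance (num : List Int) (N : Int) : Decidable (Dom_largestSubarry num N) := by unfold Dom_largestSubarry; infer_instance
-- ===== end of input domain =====

-- B replaces A's one-pass hash map of first-seen prefix-difference keys by a direct
-- brute-force scan over all windows with running 0/1/other counts (alternative, not faster).

-- ===== PORT A =====
-- loop body of A's 'for i in range(N)', kept as a named helper; state = (ans, memo, countZeros, countOnes, countTwos)
def largestSubarryBody (num : List Int) (st : Int × PySem.Dict String Int × Int × Int × Int) (i : Int) :
    Int × PySem.Dict String Int × Int × Int × Int :=
  let (ans, memo, countZeros, countOnes, countTwos) := st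
  -- num[i]: Pre_ guarantees 0 ≤ i < num.length, so pyGetD is exact here
  let x := PySem.List.pyGetD num i 0
  let (countZeros, countOnes, countTwos) :=
    if x = 0 then (countZeros + 1, countOnes, countTwos)
    else if x = 1 then (countZeros, countOnes + 1, countTwos)
    else (countZeros, countOnes, countTwos + 1)
  let currentKey := PySem.Int.toStr (countOnes - countZeros) ++ "#" ++ PySem.Int.toStr (countTwos - countOnes)
  if memo.contains currentKey then
    -- memo[currentKey]: the key is present, so getD is exact
    let prev := memo.getD currentKey 0
    (max ans (i - prev), memo, countZeros, countOnes, countTwos)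
  else
    (ans, memo.insert currentKey i, countZeros, countOnes, countTwos)

def largestSubarry (num : List Int) (N : Int) : Int :=
  let key := PySem.Int.toStr (0 - 0) ++ "#" ++ PySem.Int.toStr (0 - 0)
  let memo : PySem.Dict String Int := PySem.Dict.empty.insert key (-1)
  ((PySem.List.pyRange 0 N 1).foldl (largestSubarryBody num) (0, memo, 0, 0, 0)).1

-- ===== PORT B =====
-- inner loop body of B's 'for q in range(p, N)'; state = (z, o, t, ans)
def largestSubarryAltInner (num : List Int) (p : Int) (st : Int × Int × Int × Int) (q : Int) :
    Int × Int × Int × Int :=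
  let (z, o, t, a) := st
  -- num[q]: Pre_ guarantees 0 ≤ q < num.length, so pyGetD is exact here
  let x := PySem.List.pyGetD num q 0
  let (z, o, t) :=
    if x = 0 then (z + 1, o, t)
    else if x = 1 then (z, o + 1, t)
    else (z, o, t + 1)
  if z = o ∧ o = t then (z, o, t, max a (q - p + 1)) else (z, o, t, a)

-- outer loop body of B's 'for p in range(N)'
def largestSubarryAltOuter (num : List Int) (N : Int) (ans : Int) (p : Int) : Int :=
  ((PySem.List.pyRange p N 1).foldl (largestSubarryAltInner num p) (0, 0, 0, ans)).2.2.2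

def largestSubarry_alt (num : List Int) (N : Int) : Int :=
  (PySem.List.pyRange 0 N 1).foldl (largestSubarryAltOuter num N) 0

-- ===== PRECONDITION & SPEC =====
-- A raises IndexError iff N > len(num) (num[i] for i up to N-1); Pre_ excludes exactly those inputs.
def Pre_largestSubarry (num : List Int) (N : Int) : Prop := N ≤ (num.length : Int)
instance (num : List Int) (N : Int) : Decidable (Pre_largestSubarry num N) := by
  unfold Pre_largestSubarry; infer_instance

def pvWitness_largestSubarry : List Int × Int := ([0, 1, 2], 3)

def Spec_largestSubarry (num : List Int) (N : Int) (out : Int) : Prop := out = largestSubarry_alt num N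
instance (num : List Int) (N : Int) (out : Int) : Decidable (Spec_largestSubarry num N out) := by
  unfold Spec_largestSubarry; infer_instance

-- ===== CLAIM (what is proved, stated in full; the proofs are below) =====
def Claim_equal_largestSubarry : Prop := ∀ (num : List Int) (N : Int), Dom_largestSubarry num N → Pre_largestSubarry num N → Spec_largestSubarry num N (largestSubarry num N)

-- ===== LEMMAS AND PROOFS =====

lemma pvToDigits10_eq (n : Nat) (hn : 0 < n) :
    Nat.toDigits 10 n = ((Nat.digits 10 n).map Nat.digitChar).reverse := by
  induction n using Nat.strong_induction_on with
  | _ n ih =>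
    rw [Nat.toDigits_eq_if (by norm_num), Nat.digits_def' (by norm_num : (1:ℕ) < 10) hn]
    by_cases h : n < 10
    · have h0 : n / 10 = 0 := Nat.div_eq_of_lt h
      have hm : n % 10 = n := Nat.mod_eq_of_lt h
      simp [h, h0, hm]
    · have hd : 0 < n / 10 := Nat.div_pos (le_of_not_gt h) (by norm_num)
      have hlt : n / 10 < n := Nat.div_lt_self hn (by norm_num)
      rw [if_neg h, ih (n / 10) hlt hd]
      simp

lemma pvDigitChar_mem (d : Nat) (h : d < 10) :
    Nat.digitChar d ∈ ['0','1','2','3','4','5','6','7','8','9'] := by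
  interval_cases d <;> decide

lemma pvMem_toDigits10 (n : Nat) (c : Char) (hc : c ∈ Nat.toDigits 10 n) :
    c ∈ ['0','1','2','3','4','5','6','7','8','9'] := by
  rcases Nat.eq_zero_or_pos n with h0 | hp
  · subst h0
    simp only [Nat.toDigits_zero, List.mem_singleton] at hc
    simp [hc]
  · rw [pvToDigits10_eq n hp] at hc
    simp only [List.mem_reverse, List.mem_map] at hc
    obtain ⟨d, hd, rfl⟩ := hc
    exact pvDigitChar_mem d (Nat.digits_lt_base (by norm_num) hd)

lemma pvMapDigitChar_inj (l1 l2 : List Nat) (h1 : ∀ d ∈ l1, d < 10) (h2 : ∀ d ∈ l2, d < 10)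
    (h : l1.map Nat.digitChar = l2.map Nat.digitChar) : l1 = l2 := by
  have hinj : ∀ a < 10, ∀ b < 10, Nat.digitChar a = Nat.digitChar b → a = b := by decide
  induction l1 generalizing l2 with
  | nil => cases l2 <;> simp_all
  | cons x xs ih =>
    cases l2 with
    | nil => simp_all
    | cons y ys =>
      simp only [List.map_cons, List.cons.injEq] at h
      have hx := hinj x (h1 x (by simp)) y (h2 y (by simp)) h.1
      have := ih ys (fun d hd => h1 d (by simp [hd])) (fun d hd => h2 d (by simp [hd])) h.2
      simp [hx, this]

lemma pvToDigits10_inj (m n : Nat) (h : Nat.toDigits 10 m = Nat.toDigits 10 n) : m = n := by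
  have key : ∀ k : Nat, 0 < k → Nat.toDigits 10 k ≠ ['0'] := by
    intro k hk hcon
    rw [pvToDigits10_eq k hk] at hcon
    have : (Nat.digits 10 k).map Nat.digitChar = ['0'] := by
      have := congrArg List.reverse hcon; simpa using this
    have hdig : Nat.digits 10 k = [0] := by
      apply pvMapDigitChar_inj _ _ (fun d hd => Nat.digits_lt_base (by norm_num) hd) (by simp)
      simpa using this
    have := Nat.ofDigits_digits 10 k
    rw [hdig] at this
    simp [Nat.ofDigits] at this
    omega
  rcases Nat.eq_zero_or_pos m with hm | hm <;> rcases Nat.eq_zero_or_pos n with hn | hn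
  · omega
  · exfalso; subst hm; exact key n hn (by simpa using h.symm)
  · exfalso; subst hn; exact key m hm (by simpa using h)
  · rw [pvToDigits10_eq m hm, pvToDigits10_eq n hn] at h
    have h' := congrArg List.reverse h
    simp only [List.reverse_reverse] at h'
    have := pvMapDigitChar_inj _ _ (fun d hd => Nat.digits_lt_base (by norm_num) hd)
      (fun d hd => Nat.digits_lt_base (by norm_num) hd) h'
    have h2 := congrArg (Nat.ofDigits 10) this
    rwa [Nat.ofDigits_digits, Nat.ofDigits_digits] at h2

lemma pvHash_not_mem_toChars (n : Int) : '#' ∉ PySem.Int.toChars n := by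
  unfold PySem.Int.toChars
  split
  · intro hc
    rcases List.mem_cons.mp hc with h | h
    · exact absurd h (by decide)
    · exact absurd (pvMem_toDigits10 _ _ h) (by decide)
  · intro hc
    exact absurd (pvMem_toDigits10 _ _ hc) (by decide)

lemma pvToChars_inj (m n : Int) (h : PySem.Int.toChars m = PySem.Int.toChars n) : m = n := by
  unfold PySem.Int.toChars at h
  have hdash : ∀ k : Nat, '-' ∉ Nat.toDigits 10 k := by
    intro k hk; exact absurd (pvMem_toDigits10 _ _ hk) (by decide)
  split at h <;> split at h
  · simp only [List.cons.injEq] at h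
    have := pvToDigits10_inj _ _ h.2
    omega
  · exfalso; exact hdash _ (h ▸ List.mem_cons_self ..)
  · exfalso; exact hdash _ (h.symm ▸ List.mem_cons_self ..)
  · have := pvToDigits10_inj _ _ h
    omega

lemma pvSepSplit (s : Char) (l1 : List Char) :
    ∀ (l2 r1 r2 : List Char), s ∉ l1 → s ∉ l2 → l1 ++ s :: r1 = l2 ++ s :: r2 →
      l1 = l2 ∧ r1 = r2 := by
  induction l1 with
  | nil =>
    intro l2 r1 r2 _ hl2 h
    cases l2 with
    | nil => simpa using h
    | cons y ys =>
      simp only [List.nil_append, List.cons_append, List.cons.injEq] at h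
      exact absurd (h.1 ▸ List.mem_cons_self ..) hl2
  | cons x xs ih =>
    intro l2 r1 r2 hl1 hl2 h
    cases l2 with
    | nil =>
      simp only [List.cons_append, List.nil_append, List.cons.injEq] at h
      exact absurd (h.1.symm ▸ List.mem_cons_self ..) hl1
    | cons y ys =>
      simp only [List.cons_append, List.cons.injEq] at h
      obtain ⟨rfl, h2⟩ := h
      have := ih ys r1 r2 (fun hm => hl1 (List.mem_cons_of_mem _ hm))
        (fun hm => hl2 (List.mem_cons_of_mem _ hm)) h2
      simp [this.1, this.2]

def pvKey (v : Int × Int) : String :=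
  PySem.Int.toStr v.1 ++ "#" ++ PySem.Int.toStr v.2

lemma pvKey_inj (v w : Int × Int) (h : pvKey v = pvKey w) : v = w := by
  unfold pvKey at h
  have h' := congrArg String.toList h
  simp only [String.toList_append, PySem.Int.toList_toStr] at h'
  have hsplit := pvSepSplit '#' _ _ _ _ (pvHash_not_mem_toChars _) (pvHash_not_mem_toChars _)
    (by simpa using h')
  exact Prod.ext (pvToChars_inj _ _ hsplit.1) (pvToChars_inj _ _ hsplit.2)

def pvOther (x : Int) : Bool := !(x == 0) && !(x == 1)

def pvDD (L : List Int) (k : Nat) : Int × Int :=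
  (((L.take k).count 1 : Int) - ((L.take k).count 0 : Int),
   ((L.take k).countP pvOther : Int) - ((L.take k).count 1 : Int))

def pvF (L : List Int) (q : Nat) : Nat :=
  Nat.find (p := fun p => pvDD L p = pvDD L q) ⟨q, rfl⟩

def pvAnsSpec (L : List Int) : Nat → Int
  | 0 => 0
  | k + 1 => max (pvAnsSpec L k) ((k : Int) + 1 - (pvF L (k + 1) : Int))

def pvInnSpec (L : List Int) (p : Nat) (a : Int) : Nat → Int
  | 0 => a
  | j + 1 => if pvDD L p = pvDD L (p + j + 1) then max (pvInnSpec L p a j) ((j : Int) + 1)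
             else pvInnSpec L p a j

def pvOutSpec (L : List Int) (n : Nat) : Nat → Int
  | 0 => 0
  | p + 1 => pvInnSpec L p (pvOutSpec L n p) (n - p)

lemma pvF_le_self (L : List Int) (q : Nat) : pvF L q ≤ q := Nat.find_min' _ rfl

lemma pvF_spec (L : List Int) (q : Nat) : pvDD L (pvF L q) = pvDD L q := by
  unfold pvF; exact Nat.find_spec (⟨q, rfl⟩ : ∃ p, pvDD L p = pvDD L q)

lemma pvF_min (L : List Int) (p q : Nat) (h : pvDD L p = pvDD L q) : pvF L q ≤ p :=
  Nat.find_min' _ h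

lemma pvAnsSpec_nonneg (L : List Int) (k : Nat) : 0 ≤ pvAnsSpec L k := by
  induction k with
  | zero => simp [pvAnsSpec]
  | succ k ih => exact le_trans ih (le_max_left _ _)

lemma pvAnsSpec_term (L : List Int) (k q : Nat) (h1 : 1 ≤ q) (h2 : q ≤ k) :
    (q : Int) - (pvF L q : Int) ≤ pvAnsSpec L k := by
  induction k with
  | zero => omega
  | succ k ih =>
    rcases Nat.lt_or_ge q (k + 1) with h | h
    · exact le_trans (ih (by omega)) (le_max_left _ _)
    · have hq : q = k + 1 := by omega
      subst hq
      exact le_trans (by push_cast; omega) (le_max_right _ _)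

lemma pvAnsSpec_attain (L : List Int) (k : Nat) :
    pvAnsSpec L k = 0 ∨ ∃ q, 1 ≤ q ∧ q ≤ k ∧ pvAnsSpec L k = (q : Int) - (pvF L q : Int) := by
  induction k with
  | zero => left; rfl
  | succ k ih =>
    rcases max_choice (pvAnsSpec L k) ((k : Int) + 1 - (pvF L (k + 1) : Int)) with h | h
    · rcases ih with h0 | ⟨q, hq1, hq2, hq3⟩
      · left; rw [pvAnsSpec, h, h0]
      · right; exact ⟨q, hq1, by omega, by rw [pvAnsSpec, h, hq3]⟩
    · right
      exact ⟨k + 1, by omega, le_refl _, by rw [pvAnsSpec, h]; push_cast; ring⟩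

lemma pvInnSpec_ge_init (L : List Int) (p : Nat) (a : Int) (j : Nat) : a ≤ pvInnSpec L p a j := by
  induction j with
  | zero => simp [pvInnSpec]
  | succ j ih =>
    rw [pvInnSpec]
    split
    · exact le_trans ih (le_max_left _ _)
    · exact ih

lemma pvInnSpec_term (L : List Int) (p : Nat) (a : Int) (j r : Nat) (h1 : 1 ≤ r) (h2 : r ≤ j)
    (h : pvDD L p = pvDD L (p + r)) : (r : Int) ≤ pvInnSpec L p a j := by
  induction j with
  | zero => omega
  | succ j ih =>
    rw [pvInnSpec]
    rcases Nat.lt_or_ge r (j + 1) with hr | hr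
    · have := ih (by omega)
      split
      · exact le_trans this (le_max_left _ _)
      · exact this
    · have hrj : r = j + 1 := by omega
      subst hrj
      rw [if_pos (show pvDD L p = pvDD L (p + j + 1) from h)]
      exact le_trans (by push_cast; omega) (le_max_right _ _)

lemma pvInnSpec_attain (L : List Int) (p : Nat) (a : Int) (j : Nat) :
    pvInnSpec L p a j = a ∨
      ∃ r, 1 ≤ r ∧ r ≤ j ∧ pvDD L p = pvDD L (p + r) ∧ pvInnSpec L p a j = (r : Int) := by
  induction j with
  | zero => left; rfl
  | succ j ih =>
    rw [pvInnSpec]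
    split
    · rename_i hdd
      rcases max_choice (pvInnSpec L p a j) ((j : Int) + 1) with h | h
      · rw [h]
        rcases ih with h0 | ⟨r, hr1, hr2, hr3, hr4⟩
        · left; exact h0
        · right; exact ⟨r, hr1, by omega, hr3, hr4⟩
      · rw [h]
        right
        exact ⟨j + 1, by omega, le_refl _, hdd, by push_cast; ring⟩
    · rcases ih with h0 | ⟨r, hr1, hr2, hr3, hr4⟩
      · left; exact h0
      · right; exact ⟨r, hr1, by omega, hr3, hr4⟩

lemma pvOutSpec_nonneg (L : List Int) (n k : Nat) : 0 ≤ pvOutSpec L n k := by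
  induction k with
  | zero => simp [pvOutSpec]
  | succ k ih => exact le_trans ih (pvInnSpec_ge_init _ _ _ _)

lemma pvOutSpec_term (L : List Int) (n k p r : Nat) (hpk : p < k) (hpr : p < r) (hrn : r ≤ n)
    (h : pvDD L p = pvDD L r) : (r : Int) - (p : Int) ≤ pvOutSpec L n k := by
  induction k with
  | zero => omega
  | succ k ih =>
    rcases Nat.lt_or_ge p k with hp | hp
    · exact le_trans (ih hp) (by rw [pvOutSpec]; exact pvInnSpec_ge_init _ _ _ _)
    · have hpk' : p = k := by omega
      subst hpk'
      rw [pvOutSpec]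
      have h1 : ((r - p : Nat) : Int) = (r : Int) - (p : Int) := by omega
      rw [← h1]
      exact pvInnSpec_term L p _ (n - p) (r - p) (by omega) (by omega)
        (by rw [show p + (r - p) = r from by omega]; exact h)

lemma pvOutSpec_attain (L : List Int) (n k : Nat) (hk : k ≤ n) :
    pvOutSpec L n k = 0 ∨
      ∃ p r, p < k ∧ p < r ∧ r ≤ n ∧ pvDD L p = pvDD L r ∧
        pvOutSpec L n k = (r : Int) - (p : Int) := by
  induction k with
  | zero => left; rfl
  | succ k ih =>
    rw [pvOutSpec]
    rcases pvInnSpec_attain L k (pvOutSpec L n k) (n - k) with h0 | ⟨r, hr1, hr2, hr3, hr4⟩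
    · rw [h0]
      rcases ih (by omega) with h | ⟨p, r, hp, hpr, hrn, hdd, hval⟩
      · left; exact h
      · right; exact ⟨p, r, by omega, hpr, hrn, hdd, hval⟩
    · right
      refine ⟨k, k + r, by omega, by omega, by omega, hr3, ?_⟩
      rw [hr4]; push_cast; ring
lemma pvFinal (L : List Int) (n : Nat) : pvAnsSpec L n = pvOutSpec L n n := by
  apply le_antisymm
  · rcases pvAnsSpec_attain L n with h0 | ⟨q, hq1, hq2, hq3⟩
    · rw [h0]; exact pvOutSpec_nonneg L n n
    · rw [hq3]
      rcases Nat.lt_or_ge (pvF L q) q with hf | hf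
      · exact pvOutSpec_term L n n (pvF L q) q (by omega) hf hq2 (pvF_spec L q)
      · have heq : pvF L q = q := by have := pvF_le_self L q; omega
        rw [heq]
        simpa using pvOutSpec_nonneg L n n
  · rcases pvOutSpec_attain L n n (le_refl _) with h0 | ⟨p, r, _, hpr, hrn, hdd, hval⟩
    · rw [h0]; exact pvAnsSpec_nonneg L n
    · rw [hval]
      have h1 : pvF L r ≤ p := pvF_min L p r hdd
      have h2 := pvAnsSpec_term L n r (by omega) hrn
      omega

def pvC0 (L : List Int) (k : Nat) : Int := ((L.take k).count 0 : Int)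
def pvC1 (L : List Int) (k : Nat) : Int := ((L.take k).count 1 : Int)
def pvC2 (L : List Int) (k : Nat) : Int := (((L.take k).countP pvOther : Nat) : Int)

lemma pvDD_zero (L : List Int) : pvDD L 0 = (0, 0) := by simp [pvDD]

lemma pvTake_succ (L : List Int) (k : Nat) (hk : k < L.length) :
    L.take (k + 1) = L.take k ++ [L[k]] := by
  rw [List.take_succ]
  simp [List.getElem?_eq_getElem hk]

lemma pvCounts_succ (L : List Int) (k : Nat) (hk : k < L.length) :
    pvC0 L (k + 1) = pvC0 L k + (if L[k] = 0 then 1 else 0)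
  ∧ pvC1 L (k + 1) = pvC1 L k + (if L[k] = 1 then 1 else 0)
  ∧ pvC2 L (k + 1) = pvC2 L k + (if ¬ L[k] = 0 ∧ ¬ L[k] = 1 then 1 else 0) := by
  unfold pvC0 pvC1 pvC2
  rw [pvTake_succ L k hk]
  refine ⟨?_, ?_, ?_⟩
  · rw [List.count_append]
    split_ifs with h <;> simp [List.count_singleton, h] <;> simp_all [beq_iff_eq] <;> omega
  · rw [List.count_append]
    split_ifs with h <;> simp [List.count_singleton, h] <;> simp_all [beq_iff_eq] <;> omega
  · rw [List.countP_append]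
    split_ifs with h <;> simp [pvOther, List.countP_cons] <;> simp_all [pvOther] <;> omega

lemma pvSeg_cond (L : List Int) (p r : Nat) (hpr : p ≤ r) :
    (let s := (L.drop p).take (r - p);
      ((s.count 0 : Int) = (s.count 1 : Int) ∧ (s.count 1 : Int) = ((s.countP pvOther : Nat) : Int))
        ↔ pvDD L p = pvDD L r) := by
  intro s
  have ht : L.take r = L.take p ++ s := by
    have : r = p + (r - p) := by omega
    rw [this, List.take_add]
  simp only [pvDD, ht, List.count_append, List.countP_append, Prod.mk.injEq]
  push_cast
  omega

def pvLook (L : List Int) (k : Nat) (v : Int × Int) : Option Int :=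
  if h : ∃ p, p ≤ k ∧ pvDD L p = v then
    some ((Nat.find (Exists.imp (fun _ hp => hp.2) h) : Int) - 1)
  else none

lemma pvLook_isSome_iff (L : List Int) (k : Nat) (v : Int × Int) :
    (pvLook L k v).isSome ↔ ∃ p, p ≤ k ∧ pvDD L p = v := by
  unfold pvLook; split <;> simp_all

lemma pvLook_succ_eq (L : List Int) (k : Nat) (v : Int × Int)
    (h : pvDD L (k + 1) = v → ∃ p, p ≤ k ∧ pvDD L p = v) :
    pvLook L (k + 1) v = pvLook L k v := by
  unfold pvLook
  by_cases h1 : ∃ p, p ≤ k ∧ pvDD L p = v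
  · rw [dif_pos h1, dif_pos (h1.imp fun p hp => ⟨by omega, hp.2⟩)]
  · have h2 : ¬ ∃ p, p ≤ k + 1 ∧ pvDD L p = v := by
      rintro ⟨p, hp, hv⟩
      rcases Nat.lt_or_ge p (k + 1) with hlt | hge
      · exact h1 ⟨p, by omega, hv⟩
      · have hpe : p = k + 1 := by omega
        subst hpe; exact h1 (h hv)
    rw [dif_neg h1, dif_neg h2]

lemma pvLook_zero (L : List Int) (v : Int × Int) :
    pvLook L 0 v = if v = (0, 0) then some (-1) else none := by
  unfold pvLook
  by_cases hv : v = (0, 0)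
  · subst hv
    rw [dif_pos ⟨0, le_refl _, pvDD_zero L⟩, if_pos rfl]
    have : Nat.find (⟨0, pvDD_zero L⟩ : ∃ p, pvDD L p = (0, 0)) = 0 :=
      Nat.le_zero.mp (Nat.find_min' _ (pvDD_zero L))
    simp [this]
  · rw [dif_neg, if_neg hv]
    rintro ⟨p, hp, hdd⟩
    interval_cases p
    exact hv ((pvDD_zero L) ▸ hdd.symm)

lemma pvLook_some_val (L : List Int) (k : Nat) (j : Int)
    (h : pvLook L k (pvDD L (k + 1)) = some j) :
    j = (pvF L (k + 1) : Int) - 1 := by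
  unfold pvLook at h
  split at h
  · rename_i h1
    simp only [Option.some.injEq] at h
    rw [← h]
    congr 1
  · exact absurd h (by simp)

lemma pvF_succ_of_none (L : List Int) (k : Nat)
    (h : ¬ ∃ p, p ≤ k ∧ pvDD L p = pvDD L (k + 1)) : pvF L (k + 1) = k + 1 := by
  unfold pvF
  rw [Nat.find_eq_iff]
  exact ⟨rfl, fun m hm hdd => h ⟨m, by omega, hdd⟩⟩

lemma pvBody_step (num : List Int) (n k : Nat) (hn : n ≤ num.length) (hk : k < n)
    (ans : Int) (m : PySem.Dict String Int) :
    largestSubarryBody num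
        (ans, m, pvC0 (num.take n) k, pvC1 (num.take n) k, pvC2 (num.take n) k) (k : Int)
      = (if (m.get? (pvKey (pvDD (num.take n) (k + 1)))).isSome then
           (max ans ((k : Int) - m.getD (pvKey (pvDD (num.take n) (k + 1))) 0), m,
            pvC0 (num.take n) (k + 1), pvC1 (num.take n) (k + 1), pvC2 (num.take n) (k + 1))
         else
           (ans, m.insert (pvKey (pvDD (num.take n) (k + 1))) (k : Int),
            pvC0 (num.take n) (k + 1), pvC1 (num.take n) (k + 1), pvC2 (num.take n) (k + 1))) := by
  set L := num.take n with hL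
  have hLlen : L.length = n := by rw [hL, List.length_take]; omega
  have hkL : k < L.length := by omega
  have hknum : k < num.length := by omega
  have hx : PySem.List.pyGetD num (k : Int) 0 = L[k] := by
    rw [PySem.List.pyGetD_natCast, List.getD_eq_getElem num 0 hknum]
    exact (List.getElem_take).symm
  obtain ⟨hc0, hc1, hc2⟩ := pvCounts_succ L k hkL
  have hkey : ∀ cz co ct : Int,
      cz = pvC0 L (k+1) → co = pvC1 L (k+1) → ct = pvC2 L (k+1) →
      PySem.Int.toStr (co - cz) ++ "#" ++ PySem.Int.toStr (ct - co) = pvKey (pvDD L (k + 1)) := by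
    intro cz co ct h1 h2 h3
    subst h1; subst h2; subst h3
    rfl
  unfold largestSubarryBody
  dsimp only
  rw [hx]
  by_cases hx0 : L[k] = 0
  · rw [if_pos hx0]
    dsimp only
    rw [hkey _ _ _ (by simp [hc0, hx0]) (by simp [hc1, hx0]) (by simp [hc2, hx0])]
    rw [PySem.Dict.contains_eq_isSome_get?]
    split <;> simp_all [hc0, hc1, hc2, hx0]
  · by_cases hx1 : L[k] = 1
    · rw [if_neg hx0, if_pos hx1]
      dsimp only
      rw [hkey _ _ _ (by simp [hc0, hx1]) (by simp [hc1, hx1]) (by simp [hc2, hx1])]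
      rw [PySem.Dict.contains_eq_isSome_get?]
      split <;> simp_all [hc0, hc1, hc2, hx1]
    · rw [if_neg hx0, if_neg hx1]
      dsimp only
      rw [hkey _ _ _ (by simp [hc0, hx0]) (by simp [hc1, hx1]) (by simp [hc2, hx0, hx1])]
      rw [PySem.Dict.contains_eq_isSome_get?]
      split <;> simp_all [hc0, hc1, hc2, hx0, hx1]

lemma pvA_loop (num : List Int) (n : Nat) (hn : n ≤ num.length) :
    ∀ k, k ≤ n →
      ∃ m : PySem.Dict String Int,
        (List.range k).foldl (fun st (i : Nat) => largestSubarryBody num st (i : Int))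
            (0, PySem.Dict.empty.insert (pvKey (0, 0)) (-1), 0, 0, 0)
          = (pvAnsSpec (num.take n) k, m, pvC0 (num.take n) k, pvC1 (num.take n) k,
             pvC2 (num.take n) k)
        ∧ ∀ v, m.get? (pvKey v) = pvLook (num.take n) k v := by
  intro k
  induction k with
  | zero =>
    intro _
    refine ⟨PySem.Dict.empty.insert (pvKey (0, 0)) (-1), by simp [pvAnsSpec, pvC0, pvC1, pvC2], ?_⟩
    intro v
    rw [pvLook_zero]
    by_cases hv : v = (0, 0)
    · subst hv
      rw [PySem.Dict.get?_insert_self, if_pos rfl]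
    · rw [PySem.Dict.get?_insert_of_ne _ _ (fun h => hv (pvKey_inj _ _ h)), if_neg hv,
        PySem.Dict.get?_empty]
  | succ k ih =>
    intro hk1
    obtain ⟨m, hfold, hget⟩ := ih (by omega)
    rw [List.range_succ, List.foldl_append, hfold]
    simp only [List.foldl_cons, List.foldl_nil]
    rw [pvBody_step num n k hn (by omega)]
    set L := num.take n with hL
    by_cases hex : ∃ p, p ≤ k ∧ pvDD L p = pvDD L (k + 1)
    · have hsome : (m.get? (pvKey (pvDD L (k + 1)))).isSome := by
        rw [hget]; exact (pvLook_isSome_iff L k _).mpr hex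
      rw [if_pos hsome]
      obtain ⟨j, hj⟩ := Option.isSome_iff_exists.mp hsome
      have hjv : j = (pvF L (k + 1) : Int) - 1 :=
        pvLook_some_val L k j (by rw [← hget]; exact hj)
      refine ⟨m, ?_, ?_⟩
      · have hgd : m.getD (pvKey (pvDD L (k + 1))) 0 = j :=
          PySem.Dict.getD_of_get?_eq_some _ _ hj
        rw [hgd, hjv]
        have : max (pvAnsSpec L k) ((k : Int) - ((pvF L (k + 1) : Int) - 1)) = pvAnsSpec L (k + 1) := by
          rw [pvAnsSpec]
          congr 1
          ring
        rw [this]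
      · intro v
        rw [hget]
        exact (pvLook_succ_eq L k v (fun hv => hv ▸ hex)).symm
    · have hnone : ¬ (m.get? (pvKey (pvDD L (k + 1)))).isSome := by
        rw [hget]; exact fun h => hex ((pvLook_isSome_iff L k _).mp h)
      rw [if_neg hnone]
      have hFk : pvF L (k + 1) = k + 1 := pvF_succ_of_none L k hex
      refine ⟨m.insert (pvKey (pvDD L (k + 1))) (k : Int), ?_, ?_⟩
      · have : pvAnsSpec L (k + 1) = pvAnsSpec L k := by
          rw [pvAnsSpec, hFk]
          have h0 : ((k : Int) + 1 - ((k + 1 : Nat) : Int)) = 0 := by push_cast; ring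
          rw [h0]
          exact max_eq_left (pvAnsSpec_nonneg L k)
        rw [this]
      · intro v
        by_cases hv : v = pvDD L (k + 1)
        · subst hv
          rw [PySem.Dict.get?_insert_self]
          unfold pvLook
          rw [dif_pos ⟨k + 1, le_refl _, rfl⟩]
          have : Nat.find (⟨k + 1, rfl⟩ : ∃ p, pvDD L p = pvDD L (k + 1)) = k + 1 := hFk
          rw [this]
          push_cast
          congr 1
          ring
        · rw [PySem.Dict.get?_insert_of_ne _ _ (fun h => hv (pvKey_inj _ _ h)), hget]
          exact (pvLook_succ_eq L k v (fun h => absurd h.symm hv)).symm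

lemma pvBInner_step (num : List Int) (n p j : Nat) (hn : n ≤ num.length) (hpj : p + j < n) (a : Int) :
    largestSubarryAltInner num (p : Int)
        (pvC0 ((num.take n).drop p) j, pvC1 ((num.take n).drop p) j,
         pvC2 ((num.take n).drop p) j, a) ((p : Int) + (j : Int))
      = (pvC0 ((num.take n).drop p) (j + 1), pvC1 ((num.take n).drop p) (j + 1),
         pvC2 ((num.take n).drop p) (j + 1),
         if pvDD (num.take n) p = pvDD (num.take n) (p + j + 1) then max a ((j : Int) + 1) else a) := by
  set L := num.take n with hL
  set Ld := L.drop p with hLd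
  have hLlen : L.length = n := by rw [hL, List.length_take]; omega
  have hLdlen : Ld.length = n - p := by rw [hLd, List.length_drop, hLlen]
  have hjLd : j < Ld.length := by omega
  have hpjnum : p + j < num.length := by omega
  have hLdj : Ld[j] = num[p + j] := by
    simp only [hLd, hL, List.getElem_drop, List.getElem_take]
  have hx : PySem.List.pyGetD num ((p : Int) + (j : Int)) 0 = Ld[j] := by
    have hc : ((p : Int) + (j : Int)) = ((p + j : Nat) : Int) := by push_cast; ring
    rw [hc, PySem.List.pyGetD_natCast, List.getD_eq_getElem num 0 hpjnum, hLdj]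
  obtain ⟨hc0, hc1, hc2⟩ := pvCounts_succ Ld j hjLd
  have hcond : ∀ cz co ct : Int,
      cz = pvC0 Ld (j + 1) → co = pvC1 Ld (j + 1) → ct = pvC2 Ld (j + 1) →
      ((cz = co ∧ co = ct) ↔ pvDD L p = pvDD L (p + j + 1)) := by
    intro cz co ct h1 h2 h3
    subst h1; subst h2; subst h3
    have hs := pvSeg_cond L p (p + j + 1) (by omega)
    dsimp only at hs
    rw [show p + j + 1 - p = j + 1 from by omega] at hs
    exact hs
  have hansv : ((p : Int) + (j : Int)) - (p : Int) + 1 = (j : Int) + 1 := by ring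
  unfold largestSubarryAltInner
  dsimp only
  rw [hx]
  by_cases hx0 : Ld[j] = 0
  · rw [if_pos hx0]
    dsimp only
    have e0 : pvC0 Ld j + 1 = pvC0 Ld (j + 1) := by simp [hc0, hx0]
    have e1 : pvC1 Ld j = pvC1 Ld (j + 1) := by simp [hc1, hx0]
    have e2 : pvC2 Ld j = pvC2 Ld (j + 1) := by simp [hc2, hx0]
    rw [e0, e1, e2, hansv]
    by_cases hdd : pvDD L p = pvDD L (p + j + 1)
    · rw [if_pos ((hcond _ _ _ rfl rfl rfl).mpr hdd), if_pos hdd]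
    · rw [if_neg (fun hc => hdd ((hcond _ _ _ rfl rfl rfl).mp hc)), if_neg hdd]
  · by_cases hx1 : Ld[j] = 1
    · rw [if_neg hx0, if_pos hx1]
      dsimp only
      have e0 : pvC0 Ld j = pvC0 Ld (j + 1) := by simp [hc0, hx1]
      have e1 : pvC1 Ld j + 1 = pvC1 Ld (j + 1) := by simp [hc1, hx1]
      have e2 : pvC2 Ld j = pvC2 Ld (j + 1) := by simp [hc2, hx1]
      rw [e0, e1, e2, hansv]
      by_cases hdd : pvDD L p = pvDD L (p + j + 1)
      · rw [if_pos ((hcond _ _ _ rfl rfl rfl).mpr hdd), if_pos hdd]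
      · rw [if_neg (fun hc => hdd ((hcond _ _ _ rfl rfl rfl).mp hc)), if_neg hdd]
    · rw [if_neg hx0, if_neg hx1]
      dsimp only
      have e0 : pvC0 Ld j = pvC0 Ld (j + 1) := by simp [hc0, hx0]
      have e1 : pvC1 Ld j = pvC1 Ld (j + 1) := by simp [hc1, hx1]
      have e2 : pvC2 Ld j + 1 = pvC2 Ld (j + 1) := by simp [hc2, hx0, hx1]
      rw [e0, e1, e2, hansv]
      by_cases hdd : pvDD L p = pvDD L (p + j + 1)
      · rw [if_pos ((hcond _ _ _ rfl rfl rfl).mpr hdd), if_pos hdd]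
      · rw [if_neg (fun hc => hdd ((hcond _ _ _ rfl rfl rfl).mp hc)), if_neg hdd]

lemma pvB_inner_loop (num : List Int) (n p : Nat) (hn : n ≤ num.length) (hp : p < n) (a : Int) :
    ∀ j, j ≤ n - p →
      (List.range j).foldl
          (fun st (jj : Nat) => largestSubarryAltInner num (p : Int) st ((p : Int) + (jj : Int)))
          (0, 0, 0, a)
        = (pvC0 ((num.take n).drop p) j, pvC1 ((num.take n).drop p) j,
           pvC2 ((num.take n).drop p) j, pvInnSpec (num.take n) p a j) := by
  intro j
  induction j with
  | zero =>
    intro _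
    simp [pvC0, pvC1, pvC2, pvInnSpec]
  | succ j ih =>
    intro hj
    rw [List.range_succ, List.foldl_append, ih (by omega)]
    simp only [List.foldl_cons, List.foldl_nil]
    rw [pvBInner_step num n p j hn (by omega)]
    rw [pvInnSpec]

lemma pvPyRange_foldl {β : Type} (a b : Int) (f : β → Int → β) (init : β) :
    (PySem.List.pyRange a b 1).foldl f init
      = (List.range (b - a).toNat).foldl (fun s (k : Nat) => f s (a + (k : Int))) init := by
  rw [PySem.List.pyRange_one, List.foldl_map]

lemma pvB_outer_loop (num : List Int) (N : Int) (n : Nat) (hN : (n : Int) = N)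
    (hn : n ≤ num.length) :
    ∀ k, k ≤ n →
      (List.range k).foldl (fun a (pp : Nat) => largestSubarryAltOuter num N a (pp : Int)) 0
        = pvOutSpec (num.take n) n k := by
  intro k
  induction k with
  | zero => intro _; rfl
  | succ k ih =>
    intro hk
    rw [List.range_succ, List.foldl_append, ih (by omega)]
    simp only [List.foldl_cons, List.foldl_nil]
    unfold largestSubarryAltOuter
    rw [pvPyRange_foldl]
    rw [show (N - (k : Int)).toNat = n - k from by omega]
    rw [pvB_inner_loop num n k hn (by omega) (pvOutSpec (num.take n) n k) (n - k) (le_refl _)]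
    rfl

lemma pvA_eq (num : List Int) (N : Int) (hpre : N ≤ (num.length : Int)) :
    largestSubarry num N = pvAnsSpec (num.take N.toNat) N.toNat := by
  have hkey0 : PySem.Int.toStr 0 ++ "#" ++ PySem.Int.toStr 0 = pvKey (0, 0) := rfl
  rcases le_or_gt N 0 with hN | hN
  · unfold largestSubarry
    dsimp only
    rw [PySem.List.pyRange_one_eq_nil hN, List.foldl_nil]
    rw [show N.toNat = 0 from by omega]
    rfl
  · unfold largestSubarry
    dsimp only
    rw [pvPyRange_foldl]
    simp only [Int.sub_zero, Int.zero_add, hkey0]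
    obtain ⟨m, hfold, _⟩ := pvA_loop num N.toNat (by omega) N.toNat (le_refl _)
    rw [hfold]

lemma pvB_eq (num : List Int) (N : Int) (hpre : N ≤ (num.length : Int)) :
    largestSubarry_alt num N = pvOutSpec (num.take N.toNat) N.toNat N.toNat := by
  rcases le_or_gt N 0 with hN | hN
  · unfold largestSubarry_alt
    rw [PySem.List.pyRange_one_eq_nil hN, List.foldl_nil]
    rw [show N.toNat = 0 from by omega]
    rfl
  · unfold largestSubarry_alt
    rw [pvPyRange_foldl]
    simp only [Int.sub_zero, Int.zero_add]
    exact pvB_outer_loop num N N.toNat (by omega) (by omega) N.toNat (le_refl _)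

-- ===== VERDICT (by name: the statement is the Claim_ definition above) =====
theorem largestSubarry_spec : Claim_equal_largestSubarry := by
  intro num N _ hpre
  unfold Spec_largestSubarry
  rw [pvA_eq num N hpre, pvB_eq num N hpre, pvFinal]
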